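-- pv_equiv track=rewrite | github.com/sfgoodwiniii/sfgoodwiniii.github.io | classes/RIT-CSCI-141/hw_04/function.py | fun_iter
-- ===== SOURCE A (Python) =====
-- def fun_iter(x: int, y: int) -> int:
--     """
--     Description :
--         Evaluates the given piecewise function from the pdf
--         description of the homework. Uses iteration to find
--         the value of the function.
--
--     Preconditions :
--         Parameter x: Integer value
--         Parameter y: Integer value
--
--     Postconditions :
--         returns value at the given x, y of the piecewise
--         function.
--     """
--     _temp = 0
--
--     if x <= 0 and y <= 0:
--         return 1
--     elif x > 0 and y <= 0:
--         return x
--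
--     while y > 0:
--         _temp += x; x -= 1
--         _temp += y; y -= 1
--
--     return _temp
-- ===== SOURCE B (Python) =====
-- def fun_iter(x: int, y: int) -> int:
--     # Closed form: the loop adds (x + x-1 + ... + x-y+1) + (y + y-1 + ... + 1)
--     # = y*x - y*(y-1)//2 + y*(y+1)//2 = y*(x+1).
--     if y <= 0:
--         return 1 if x <= 0 else x
--     return y * (x + 1)
-- ===== Notes on version B (the rewrite author's own statement) =====
-- stated objective: faster
-- what changed: Replaced the O(y) counting loop by the arithmetic-series closed form y*(x+1) for y>0, keeping the two base cases.
import Mathlib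
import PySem

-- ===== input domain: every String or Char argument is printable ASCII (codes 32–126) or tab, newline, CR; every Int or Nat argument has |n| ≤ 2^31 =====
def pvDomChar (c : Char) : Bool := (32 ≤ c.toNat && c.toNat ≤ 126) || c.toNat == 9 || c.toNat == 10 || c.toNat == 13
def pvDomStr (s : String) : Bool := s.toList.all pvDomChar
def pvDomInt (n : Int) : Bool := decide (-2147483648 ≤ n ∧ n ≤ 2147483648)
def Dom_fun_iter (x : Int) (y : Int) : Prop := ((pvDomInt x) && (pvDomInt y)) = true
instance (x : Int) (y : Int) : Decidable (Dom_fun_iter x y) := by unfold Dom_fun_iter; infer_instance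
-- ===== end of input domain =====

-- B replaces A's O(y) counting loop with the arithmetic-series closed form y*(x+1); faster (asymptotic).


-- ===== PORT A =====
-- the while loop of A: while y > 0: _temp += x; x -= 1; _temp += y; y -= 1
def funIterLoop (temp : Int) (x : Int) (y : Int) : Int :=
  if y > 0 then funIterLoop (temp + x + y) (x - 1) (y - 1) else temp
termination_by y.toNat
decreasing_by omega

def fun_iter (x : Int) (y : Int) : Int :=
  if x ≤ 0 ∧ y ≤ 0 then 1
  else if x > 0 ∧ y ≤ 0 then x
  else funIterLoop 0 x y

-- ===== PORT B =====
def fun_iter_alt (x : Int) (y : Int) : Int :=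
  if y ≤ 0 then (if x ≤ 0 then 1 else x)
  else y * (x + 1)

-- ===== PRECONDITION & SPEC =====
def Spec_fun_iter (x : Int) (y : Int) (out : Int) : Prop := out = fun_iter_alt x y
instance (x : Int) (y : Int) (out : Int) : Decidable (Spec_fun_iter x y out) := by unfold Spec_fun_iter; infer_instance

-- ===== CLAIM (what is proved, stated in full; the proofs are below) =====
def Claim_equal_fun_iter : Prop := ∀ (x : Int) (y : Int), Dom_fun_iter x y → Spec_fun_iter x y (fun_iter x y)

-- ===== LEMMAS AND PROOFS =====
-- loop invariant: the loop returns temp plus the arithmetic series, i.e. temp + y*(x+1)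
theorem funIterLoop_closed (temp x y : Int) :
    funIterLoop temp x y = if y > 0 then temp + y * (x + 1) else temp := by
  by_cases h : y > 0
  · have hn : y.toNat ≠ 0 := by omega
    rw [funIterLoop]
    simp only [h, if_pos]
    have ih := funIterLoop_closed (temp + x + y) (x - 1) (y - 1)
    rw [ih]
    by_cases h1 : y - 1 > 0
    · simp only [h1, if_pos]; ring
    · simp only [h1, if_false]
      have hy : y = 1 := by omega
      subst hy; ring
  · rw [funIterLoop]; simp [h]
termination_by y.toNat
decreasing_by omega

-- ===== VERDICT (by name: the statement is the Claim_ definition above) =====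
theorem fun_iter_spec : Claim_equal_fun_iter := by
  intro x y _
  unfold Spec_fun_iter fun_iter fun_iter_alt
  rw [funIterLoop_closed]
  split_ifs <;> omega
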